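-- pv_equiv track=rewrite | github.com/xiaoxiaobt/Reaktor-Data-Science-project | yearly_dataframes.py | get_index_positions
-- ===== SOURCE A (Python) =====
-- def get_index_positions(list_of_elements, element):
--     """
--     Returns the indexes of all occurrences of the given 'element' in
--     the list of columns 'list_of_elements'.
--     :param list_of_elements: the list of the columns of the data frame
--     :param element: the name of the column to find
--     :return: list of indexes
--     """
--     index_pos_list = []
--     index_pos = 0
--     while True:
--         try:
--             # Search for item in list from index_pos to the end of list
--             index_pos = list_of_elements.index(element, index_pos)
--             # Add the index position in list
--             index_pos_list.append(index_pos)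
--             index_pos += 1
--         except ValueError as _:
--             break
--
--     return index_pos_list
-- ===== SOURCE B (Python) =====
-- def get_index_positions(list_of_elements, element):
--     """Single linear pass: collect each index whose element equals the target."""
--     return [i for i, x in enumerate(list_of_elements) if x == element]
-- ===== Notes on version B (the rewrite author's own statement) =====
-- stated objective: simpler
-- what changed: Replaces the while/try/except loop that repeatedly resumes list.index(element, start) and terminates via ValueError with one enumerate pass collecting indices by a direct equality test.
import Mathlib
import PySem

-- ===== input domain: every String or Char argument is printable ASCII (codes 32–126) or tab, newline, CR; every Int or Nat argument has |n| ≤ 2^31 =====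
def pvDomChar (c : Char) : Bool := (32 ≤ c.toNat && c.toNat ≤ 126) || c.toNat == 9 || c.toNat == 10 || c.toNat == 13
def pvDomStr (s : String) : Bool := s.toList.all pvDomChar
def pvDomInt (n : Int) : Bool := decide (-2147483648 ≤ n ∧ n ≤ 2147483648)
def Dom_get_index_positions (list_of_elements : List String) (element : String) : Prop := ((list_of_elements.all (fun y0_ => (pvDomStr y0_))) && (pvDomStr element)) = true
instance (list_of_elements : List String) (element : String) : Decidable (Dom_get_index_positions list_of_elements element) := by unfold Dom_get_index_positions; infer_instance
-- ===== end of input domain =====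

-- B replaces A's resumed list.index search with try/except termination by a single enumerate pass with a direct equality test (simpler, same O(n) cost).


-- ===== PORT A =====
-- list.index(element, start): first index ≥ start whose element equals `element` (none = ValueError)
def pyIndexFrom (xs : List String) (e : String) (pos : Nat) : Option Nat :=
  (PySem.List.index? (xs.drop pos) e).map (· + pos)

theorem pyIndexFrom_ge_lt {xs : List String} {e : String} {pos i : Nat}
    (h : pyIndexFrom xs e pos = some i) : pos ≤ i ∧ i < xs.length := by
  unfold pyIndexFrom at h
  rw [PySem.List.index?_eq_idxOf?] at h
  cases hk : List.idxOf? e (xs.drop pos) with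
  | none => simp [hk] at h
  | some k =>
    simp [hk] at h
    have hk' : PySem.List.index? (xs.drop pos) e = some k := by
      simp [PySem.List.index?_eq_idxOf?, hk]
    obtain ⟨hlt, _, _⟩ := PySem.List.getElem_of_index?_eq_some hk'
    have hd := List.length_drop (l := xs) (i := pos)
    omega

-- literal transliteration of A's while/try loop: resume the search at index_pos, stop on ValueError
def loopA (xs : List String) (e : String) (pos : Nat) : List Int :=
  match h : pyIndexFrom xs e pos with
  | none => []
  | some i => (i : Int) :: loopA xs e (i + 1)
termination_by xs.length - pos
decreasing_by
  have := pyIndexFrom_ge_lt h; omega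

def get_index_positions (list_of_elements : List String) (element : String) : List Int :=
  loopA list_of_elements element 0

-- ===== PORT B =====
def get_index_positions_alt (list_of_elements : List String) (element : String) : List Int :=
  ((PySem.List.enumerate list_of_elements 0).filter (fun p => p.2 == element)).map (·.1)

-- ===== PRECONDITION & SPEC =====
def Spec_get_index_positions (list_of_elements : List String) (element : String) (out : List Int) : Prop := out = get_index_positions_alt list_of_elements element
instance (list_of_elements : List String) (element : String) (out : List Int) : Decidable (Spec_get_index_positions list_of_elements element out) := by unfold Spec_get_index_positions; infer_instance

-- ===== CLAIM (what is proved, stated in full; the proofs are below) =====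
def Claim_equal_get_index_positions : Prop := ∀ (list_of_elements : List String) (element : String), Dom_get_index_positions list_of_elements element → Spec_get_index_positions list_of_elements element (get_index_positions list_of_elements element)

-- ===== LEMMAS AND PROOFS =====

-- ===== VERDICT (by name: the statement is the Claim_ definition above) =====
theorem loopA_none {xs : List String} {e : String} {pos : Nat}
    (h : pyIndexFrom xs e pos = none) : loopA xs e pos = [] := by
  rw [loopA]; split
  · rfl
  · rename_i i h2; rw [h] at h2; cases h2

theorem loopA_some {xs : List String} {e : String} {pos i : Nat}
    (h : pyIndexFrom xs e pos = some i) :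
    loopA xs e pos = (i : Int) :: loopA xs e (i + 1) := by
  rw [loopA]; split
  · rename_i h2; rw [h] at h2; cases h2
  · rename_i j h2; rw [h] at h2; cases h2; rfl

-- invariant: the resumed-search loop from pos produces exactly the matching indices of the suffix
theorem loopA_eq (xs : List String) (e : String) (pos : Nat) :
    loopA xs e pos =
      ((PySem.List.enumerate (xs.drop pos) (pos : Int)).filter (fun p => p.2 == e)).map (·.1) := by
  induction pos using loopA.induct (xs := xs) (e := e) with
  | case1 pos h =>
    rw [loopA_none h]
    have hnone : PySem.List.index? (xs.drop pos) e = none := by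
      cases hk : PySem.List.index? (xs.drop pos) e with
      | none => rfl
      | some k =>
        exfalso
        unfold pyIndexFrom at h
        rw [hk] at h
        simp at h
    have hnm : e ∉ xs.drop pos := (PySem.List.index?_eq_none_iff _ _).mp hnone
    symm
    rw [List.map_eq_nil_iff, List.filter_eq_nil_iff]
    intro p hp
    obtain ⟨k, hk, rfl⟩ := (PySem.List.mem_enumerate_iff _ _ _).mp hp
    have : (xs.drop pos)[k] ∈ xs.drop pos := List.getElem_mem hk
    simp only [beq_iff_eq]
    intro hEq; exact hnm (hEq ▸ this)
  | case2 pos i h ih =>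
    obtain ⟨k, hk, hik⟩ : ∃ k, PySem.List.index? (xs.drop pos) e = some k ∧ k + pos = i := by
      unfold pyIndexFrom at h
      cases hk : PySem.List.index? (xs.drop pos) e with
      | none => rw [hk] at h; simp at h
      | some k => rw [hk] at h; simp at h; exact ⟨k, rfl, h⟩
    obtain ⟨pre, suf, hsplit, hlen, hnm⟩ := (PySem.List.index?_eq_some_iff _ _ _).mp hk
    have hdrop : xs.drop (i + 1) = suf := by
      have h1 : xs.drop (i + 1) = (xs.drop pos).drop (k + 1) := by
        rw [List.drop_drop]; congr 1; omega
      rw [h1, hsplit]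
      have : pre ++ e :: suf = (pre ++ [e]) ++ suf := by simp
      rw [this]
      have hlen2 : k + 1 = (pre ++ [e]).length := by simp [hlen]
      rw [hlen2, List.drop_left]
    rw [loopA_some h]
    rw [hsplit, PySem.List.enumerate_append, PySem.List.enumerate_cons]
    rw [List.filter_append]
    have hfil : (PySem.List.enumerate pre (pos : Int)).filter (fun p => p.2 == e) = [] := by
      rw [List.filter_eq_nil_iff]
      intro p hp
      obtain ⟨j, hj, rfl⟩ := (PySem.List.mem_enumerate_iff _ _ _).mp hp
      have : pre[j] ∈ pre := List.getElem_mem hj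
      simp only [beq_iff_eq]
      intro hEq; exact hnm (hEq ▸ this)
    rw [hfil]
    simp only [List.nil_append, List.filter_cons, beq_self_eq_true, if_pos, List.map_cons]
    rw [ih, hdrop, hlen]
    have h1 : ((pos : Int) + (k : Int)) = (i : Int) := by omega
    rw [h1]
    norm_cast

theorem get_index_positions_spec : Claim_equal_get_index_positions := by
  intro xs e _
  unfold Spec_get_index_positions get_index_positions get_index_positions_alt
  simpa using loopA_eq xs e 0
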